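-- pv_equiv track=rewrite | github.com/laeblab/miSeqClonePicker | core/load.py | _grow_selection
-- ===== SOURCE A (Python) =====
-- from typing import Any, List, Optional, Tuple
--
-- def _grow_selection(
--     table: List[List[object]], row_idx: int, column_idx: int
-- ) -> Tuple[int, int]:
--     width = 0
--     height = 0
--
--     for column in table[column_idx:]:
--         current_height = 0
--
--         for cell in column[row_idx:]:
--             if cell in (0, 1):
--                 current_height += 1
--             else:
--                 break
--
--         if not current_height or current_height < height:
--             break
--
--         width += 1
--         height = min(height or current_height, current_height)
--
--     return width, height
-- ===== SOURCE B (Python) =====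
-- def _grow_selection(table, row_idx, column_idx):
--     cols = table[column_idx:]
--     if not cols:
--         return 0, 0
--     # height is fixed by the first column's run of 0/1 cells from row_idx
--     height = 0
--     for cell in cols[0][row_idx:]:
--         if cell in (0, 1):
--             height += 1
--         else:
--             break
--     if height == 0:
--         return 0, 0
--     width = 1
--     for column in cols[1:]:
--         window = column[row_idx:][:height]
--         if len(window) == height and all(c in (0, 1) for c in window):
--             width += 1
--         else:
--             break
--     return width, height
-- ===== Notes on version B (the rewrite author's own statement) =====
-- stated objective: simpler
-- what changed: B derives the selection height once from the first column's run and then only validates a fixed-size window (length check + all()) in each subsequent column, instead of A's re-counting each column's run and folding it through a min/or accumulator.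
import Mathlib
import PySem

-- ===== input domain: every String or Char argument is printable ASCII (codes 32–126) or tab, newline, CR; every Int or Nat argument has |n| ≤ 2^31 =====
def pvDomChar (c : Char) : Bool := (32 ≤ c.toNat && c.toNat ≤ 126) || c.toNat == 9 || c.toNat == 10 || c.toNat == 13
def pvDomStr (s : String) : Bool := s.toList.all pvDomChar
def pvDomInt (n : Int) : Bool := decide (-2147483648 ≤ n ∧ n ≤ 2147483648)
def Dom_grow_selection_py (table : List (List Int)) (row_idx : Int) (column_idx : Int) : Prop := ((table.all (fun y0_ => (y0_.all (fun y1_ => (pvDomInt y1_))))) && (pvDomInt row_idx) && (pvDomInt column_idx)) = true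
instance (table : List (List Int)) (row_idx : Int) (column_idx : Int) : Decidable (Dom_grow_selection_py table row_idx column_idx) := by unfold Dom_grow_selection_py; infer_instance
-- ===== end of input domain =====

-- B fixes the height from the first column's run and then only validates a fixed window per column,
-- instead of A's per-column re-count folded through a min/or accumulator (objective: simpler).

-- ===== PORT A =====
-- inner loop: for cell in column[row_idx:]: if cell in (0,1): current_height += 1 else break
def pvRunA : List Int → Int → Int
  | [], acc => acc
  | c :: rest, acc => if c = 0 ∨ c = 1 then pvRunA rest (acc + 1) else acc

-- outer loop over table[column_idx:] carrying width and height
def pvLoopA : List (List Int) → Int → Int → Int → Int × Int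
  | [], _, width, height => (width, height)
  | col :: rest, row_idx, width, height =>
    let ch := pvRunA (PySem.List.slice col (some row_idx) none) 0
    if ch = 0 ∨ ch < height then (width, height)
    else pvLoopA rest row_idx (width + 1) (min (if height = 0 then ch else height) ch)

def grow_selection_py (table : List (List Int)) (row_idx : Int) (column_idx : Int) : Int × Int :=
  pvLoopA (PySem.List.slice table (some column_idx) none) row_idx 0 0

-- ===== PORT B =====
-- first-column run of 0/1 cells
def pvHeightB : List Int → Int
  | [] => 0
  | c :: rest => if c = 0 ∨ c = 1 then 1 + pvHeightB rest else 0

-- for column in cols[1:]: window = column[row_idx:][:height]; check len and all()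
def pvLoopB : List (List Int) → Int → Int → Int → Int × Int
  | [], _, height, width => (width, height)
  | col :: rest, row_idx, height, width =>
    let window := PySem.List.slice (PySem.List.slice col (some row_idx) none) none (some height)
    if (window.length : Int) = height ∧ window.all (fun c => c == 0 || c == 1) then
      pvLoopB rest row_idx height (width + 1)
    else (width, height)

def grow_selection_py_alt (table : List (List Int)) (row_idx : Int) (column_idx : Int) : Int × Int :=
  match PySem.List.slice table (some column_idx) none with
  | [] => (0, 0)
  | col0 :: rest =>
    let height := pvHeightB (PySem.List.slice col0 (some row_idx) none)
    if height = 0 then (0, 0)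
    else pvLoopB rest row_idx height 1

-- ===== PRECONDITION & SPEC =====
def Spec_grow_selection_py (table : List (List Int)) (row_idx : Int) (column_idx : Int) (out : Int × Int) : Prop := out = grow_selection_py_alt table row_idx column_idx
instance (table : List (List Int)) (row_idx : Int) (column_idx : Int) (out : Int × Int) : Decidable (Spec_grow_selection_py table row_idx column_idx out) := by unfold Spec_grow_selection_py; infer_instance

-- ===== CLAIM (what is proved, stated in full; the proofs are below) =====
def Claim_equal_grow_selection_py : Prop := ∀ (table : List (List Int)) (row_idx : Int) (column_idx : Int), Dom_grow_selection_py table row_idx column_idx → Spec_grow_selection_py table row_idx column_idx (grow_selection_py table row_idx column_idx)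

-- ===== LEMMAS AND PROOFS =====

theorem pvHeightB_nonneg (s : List Int) : 0 ≤ pvHeightB s := by
  induction s with
  | nil => simp [pvHeightB]
  | cons c rest ih => simp only [pvHeightB]; split <;> omega

theorem pvRunA_eq (s : List Int) : ∀ acc, pvRunA s acc = acc + pvHeightB s := by
  induction s with
  | nil => intro acc; simp [pvRunA, pvHeightB]
  | cons c rest ih =>
    intro acc
    simp only [pvRunA, pvHeightB]
    split
    · rw [ih]; ring
    · omega

-- B's window check succeeds exactly when the column's run reaches height n
theorem cond_iff (s : List Int) : ∀ n : Nat,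
    (((s.take n).length : Int) = (n : Int) ∧ (s.take n).all (fun c => c == 0 || c == 1)) ↔
      (n : Int) ≤ pvHeightB s := by
  induction s with
  | nil =>
    intro n
    cases n with
    | zero => simp [pvHeightB]
    | succ m =>
      simp only [List.take_nil, List.length_nil, pvHeightB]
      constructor
      · intro ⟨h, _⟩; exfalso; omega
      · intro h; exfalso; omega
  | cons c rest ih =>
    intro n
    cases n with
    | zero => simp [pvHeightB_nonneg]
    | succ m =>
      simp only [List.take_succ_cons, List.length_cons, List.all_cons, pvHeightB,
        Bool.and_eq_true]
      by_cases hc : c = 0 ∨ c = 1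
      · have hcb : (c == 0 || c == 1) = true := by
          rcases hc with h | h <;> simp [h]
        simp only [if_pos hc, hcb, true_and]
        constructor
        · intro ⟨hl, ha⟩
          have := (ih m).mp ⟨by push_cast at hl ⊢; omega, ha⟩
          omega
        · intro h
          have := (ih m).mpr (by omega)
          exact ⟨by push_cast [this.1] at *; omega, this.2⟩
      · have hcb : (c == 0 || c == 1) = false := by
          simp only [Bool.or_eq_false_iff, beq_eq_false_iff_ne]
          exact ⟨fun h => hc (Or.inl h), fun h => hc (Or.inr h)⟩
        simp only [if_neg hc, hcb]
        constructor
        · intro ⟨_, h, _⟩; exact absurd h (by simp)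
        · intro h; exfalso; omega

-- the two column loops agree once height is positive and fixed
theorem loop_eq (cols : List (List Int)) : ∀ (row_idx w h : Int), 0 < h →
    pvLoopA cols row_idx w h = pvLoopB cols row_idx h w := by
  induction cols with
  | nil => intro _ _ _ _; simp [pvLoopA, pvLoopB]
  | cons col rest ih =>
    intro row_idx w h hh
    simp only [pvLoopA, pvLoopB]
    set s := PySem.List.slice col (some row_idx) none with hs
    have hrun : pvRunA s 0 = pvHeightB s := by rw [pvRunA_eq]; ring
    have hnn : 0 ≤ pvHeightB s := pvHeightB_nonneg s
    have hwin : PySem.List.slice s none (some h) = s.take h.toNat :=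
      PySem.List.slice_to s (le_of_lt hh)
    have hcond := cond_iff s h.toNat
    rw [hrun, hwin]
    have hcast : ((h.toNat : Nat) : Int) = h := Int.toNat_of_nonneg (le_of_lt hh)
    rw [hcast] at hcond
    by_cases hb : pvHeightB s < h
    · rw [if_pos (Or.inr hb), if_neg (by rw [hcond]; omega)]
    · rw [if_neg (by omega), if_pos (hcond.mpr (by omega))]
      have : min (if h = 0 then pvHeightB s else h) (pvHeightB s) = h := by
        rw [if_neg (by omega)]; omega
      rw [this]
      exact ih row_idx (w + 1) h hh

theorem grow_eq (table : List (List Int)) (row_idx column_idx : Int) :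
    grow_selection_py table row_idx column_idx = grow_selection_py_alt table row_idx column_idx := by
  unfold grow_selection_py grow_selection_py_alt
  cases hcols : PySem.List.slice table (some column_idx) none with
  | nil => simp [pvLoopA]
  | cons col0 rest =>
    simp only [pvLoopA]
    set s0 := PySem.List.slice col0 (some row_idx) none with hs0
    have hrun : pvRunA s0 0 = pvHeightB s0 := by rw [pvRunA_eq]; ring
    have hnn : 0 ≤ pvHeightB s0 := pvHeightB_nonneg s0
    rw [hrun]
    by_cases h0 : pvHeightB s0 = 0
    · rw [if_pos (Or.inl h0), if_pos h0]
    · rw [if_neg (by omega), if_neg h0]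
      simp only [if_true, min_self]
      have : (0 : Int) + 1 = 1 := by norm_num
      rw [this]
      exact loop_eq rest row_idx 1 (pvHeightB s0) (by omega)

-- ===== VERDICT (by name: the statement is the Claim_ definition above) =====
theorem grow_selection_py_spec : Claim_equal_grow_selection_py := by
  intro table row_idx column_idx _
  exact grow_eq table row_idx column_idx
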